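-- pv_equiv track=rewrite | github.com/jmventar/ApiBot | src/utils/csv_batch_utils.py | get_batch_sizes
-- ===== SOURCE A (Python) =====
-- def get_batch_sizes(total_rows: int, batches: int) -> list[int]:
--     if batches <= 0:
--         raise ValueError("The number of batches must be greater than 0.")
--
--     if total_rows <= 0:
--         raise ValueError("The CSV file has no data rows to split.")
--
--     if batches > total_rows:
--         raise ValueError(
--             "The number of batches cannot be greater than the number of data rows."
--         )
--
--     base_size, remainder = divmod(total_rows, batches)
--     return [base_size + (1 if index < remainder else 0) for index in range(batches)]
-- ===== SOURCE B (Python) =====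
-- def get_batch_sizes(total_rows: int, batches: int) -> list[int]:
--     if batches <= 0:
--         raise ValueError("The number of batches must be greater than 0.")
--
--     if total_rows <= 0:
--         raise ValueError("The CSV file has no data rows to split.")
--
--     if batches > total_rows:
--         raise ValueError(
--             "The number of batches cannot be greater than the number of data rows."
--         )
--
--     # Greedy: each batch takes the ceiling of rows still to place over
--     # batches still to fill; this yields the same balanced sequence.
--     sizes = []
--     remaining = total_rows
--     for left in range(batches, 0, -1):
--         size = -(-remaining // left)  # ceil division
--         sizes.append(size)
--         remaining -= size
--     return sizes
-- ===== Notes on version B (the rewrite author's own statement) =====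
-- stated objective: alternative
-- what changed: Replaces divmod-plus-indexed-comprehension with a greedy sequential loop: each batch takes ceil(remaining_rows/remaining_batches) and subtracts it, carrying the remaining row count instead of ever computing a base size and remainder.
import Mathlib
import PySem

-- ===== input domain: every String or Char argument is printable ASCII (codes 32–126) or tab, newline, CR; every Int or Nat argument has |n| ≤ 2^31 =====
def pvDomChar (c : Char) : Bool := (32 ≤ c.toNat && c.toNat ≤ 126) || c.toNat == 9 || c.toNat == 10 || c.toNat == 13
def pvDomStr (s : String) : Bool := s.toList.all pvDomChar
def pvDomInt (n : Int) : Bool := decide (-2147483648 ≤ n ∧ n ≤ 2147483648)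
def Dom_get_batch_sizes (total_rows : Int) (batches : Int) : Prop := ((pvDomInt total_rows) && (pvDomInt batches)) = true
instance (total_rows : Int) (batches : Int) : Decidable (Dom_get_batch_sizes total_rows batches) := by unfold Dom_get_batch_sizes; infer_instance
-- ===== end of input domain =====

-- B distributes the rows with a greedy loop (each batch takes the ceiling of
-- remaining rows over remaining batches) instead of divmod plus a per-index
-- comprehension; objective: alternative algorithm, same cost. Equivalence is
-- about the return value on inputs where A does not raise (see Pre_).

-- ===== PORT A =====
-- Python A raises ValueError on the three guard branches; those inputs are
-- excluded by Pre_; the port returns [] there (value irrelevant).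
def get_batch_sizes (total_rows : Int) (batches : Int) : List Int :=
  if batches ≤ 0 then []
  else if total_rows ≤ 0 then []
  else if batches > total_rows then []
  else
    let base_size := PySem.Int.floordiv total_rows batches
    let remainder := PySem.Int.mod total_rows batches
    (PySem.List.pyRange 0 batches 1).map
      (fun index => base_size + (if index < remainder then 1 else 0))

-- ===== PORT B =====
-- the countdown loop 'for left in range(batches, 0, -1)' as structural
-- recursion on the number of batches still to fill, carrying 'remaining'
def pvGreedy_get_batch_sizes (remaining : Int) : Nat → List Int
  | 0 => []
  | Nat.succ k =>
    let size := -(PySem.Int.floordiv (-remaining) ((k : Int) + 1))  -- ceil division -(-remaining // left)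
    size :: pvGreedy_get_batch_sizes (remaining - size) k

def get_batch_sizes_alt (total_rows : Int) (batches : Int) : List Int :=
  if batches ≤ 0 then []
  else if total_rows ≤ 0 then []
  else if batches > total_rows then []
  else pvGreedy_get_batch_sizes total_rows batches.toNat

-- ===== PRECONDITION & SPEC =====
-- Pre_ excludes exactly the inputs on which Python A raises ValueError (its three guard clauses).
def Pre_get_batch_sizes (total_rows : Int) (batches : Int) : Prop :=
  0 < batches ∧ 0 < total_rows ∧ batches ≤ total_rows
instance (total_rows : Int) (batches : Int) : Decidable (Pre_get_batch_sizes total_rows batches) := by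
  unfold Pre_get_batch_sizes; infer_instance
def pvWitness_get_batch_sizes : Int × Int := (7, 3)

def Spec_get_batch_sizes (total_rows : Int) (batches : Int) (out : List Int) : Prop := out = get_batch_sizes_alt total_rows batches
instance (total_rows : Int) (batches : Int) (out : List Int) : Decidable (Spec_get_batch_sizes total_rows batches out) := by unfold Spec_get_batch_sizes; infer_instance

-- ===== CLAIM (what is proved, stated in full; the proofs are below) =====
def Claim_equal_get_batch_sizes : Prop := ∀ (total_rows : Int) (batches : Int), Dom_get_batch_sizes total_rows batches → Pre_get_batch_sizes total_rows batches → Spec_get_batch_sizes total_rows batches (get_batch_sizes total_rows batches)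

-- ===== LEMMAS AND PROOFS =====

-- ceiling division of q*b + r by b (0 ≤ r < b) is q+1 when r > 0, q when r = 0
theorem ceil_step (q r b : Int) (hb : 0 < b) (hr0 : 0 ≤ r) (hrb : r ≤ b) :
    -(PySem.Int.floordiv (-(q * b + r)) b) = q + (if 0 < r then 1 else 0) := by
  rw [PySem.Int.neg_floordiv_neg_eq_iff_of_pos hb]
  split_ifs with h
  · constructor <;> nlinarith
  · constructor <;> nlinarith

-- the greedy loop on q*b + r (0 ≤ r ≤ b) yields r copies of q+1 then b-r copies of q
theorem greedy_eq_blocks (b : Nat) : ∀ q r : Int, 0 ≤ r → r ≤ (b : Int) →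
    pvGreedy_get_batch_sizes (q * b + r) b
      = List.replicate r.toNat (q + 1) ++ List.replicate (b - r.toNat) q := by
  induction b with
  | zero =>
    intro q r hr0 hrb
    have : r = 0 := le_antisymm (by exact_mod_cast hrb) hr0
    simp [pvGreedy_get_batch_sizes, this]
  | succ k ih =>
    intro q r hr0 hrb
    have hb : (0 : Int) < (k : Int) + 1 := by positivity
    simp only [pvGreedy_get_batch_sizes]
    push_cast
    have hstep := ceil_step q r ((k : Int) + 1) hb hr0 (by push_cast at hrb; omega)
    rw [hstep]
    by_cases hpos : 0 < r
    · simp only [if_pos hpos]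
      have harg2 : q * ((k : Int) + 1) + r - (q + 1) = q * (k : Int) + (r - 1) := by ring
      rw [harg2, ih q (r - 1) (by omega) (by push_cast at hrb; omega)]
      have h1 : r.toNat = (r - 1).toNat + 1 := by omega
      rw [h1]
      simp [List.replicate_succ, Nat.succ_sub_succ]
    · have hr : r = 0 := by omega
      subst hr
      rw [if_neg (lt_irrefl 0)]
      have harg2 : q * ((k : Int) + 1) + 0 - (q + 0) = q * (k : Int) + 0 := by ring
      rw [harg2, ih q 0 (by omega) (by positivity)]
      simp [List.replicate_succ]

-- the per-index conditional comprehension over range(0,n) equals the two blocks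
theorem map_range_ite_eq_replicate (base r : Int) (n : Nat) (hr0 : 0 ≤ r) (hrn : r ≤ (n : Int)) :
    (List.range n).map (fun (k : Nat) => base + (if (k : Int) < r then 1 else 0))
      = List.replicate r.toNat (base + 1) ++ List.replicate (n - r.toNat) base := by
  apply List.ext_getElem
  · simp
    omega
  · intro i h1 h2
    simp only [List.getElem_map, List.getElem_range]
    by_cases hi : i < r.toNat
    · rw [List.getElem_append_left (by simpa using hi)]
      have : (i : Int) < r := by omega
      simp [this]
    · rw [List.getElem_append_right (by simpa using hi)]
      have : ¬ ((i : Int) < r) := by omega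
      simp [this]

theorem get_batch_sizes_eq_alt (total_rows batches : Int)
    (hb : 0 < batches) (ht : 0 < total_rows) (hbt : batches ≤ total_rows) :
    get_batch_sizes total_rows batches = get_batch_sizes_alt total_rows batches := by
  unfold get_batch_sizes get_batch_sizes_alt
  have h1 : ¬ batches ≤ 0 := by omega
  have h2 : ¬ total_rows ≤ 0 := by omega
  have h3 : ¬ batches > total_rows := by omega
  simp only [if_neg h1, if_neg h2, if_neg h3]
  set q := PySem.Int.floordiv total_rows batches with hq
  rw [show PySem.Int.mod total_rows batches = total_rows % batches from
        PySem.Int.mod_eq_emod_of_pos hb]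
  set r := total_rows % batches with hr
  have hr0 : 0 ≤ r := Int.emod_nonneg _ (by omega)
  have hrb : r < batches := Int.emod_lt_of_pos _ hb
  have hdecomp : total_rows = q * batches + r := by
    have := PySem.Int.floordiv_mul_add_mod total_rows batches
    rw [PySem.Int.mod_eq_emod_of_pos hb, ← hq, ← hr] at this
    linarith
  have hnb : ((batches.toNat : Nat) : Int) = batches := Int.toNat_of_nonneg hb.le
  -- A side
  rw [PySem.List.pyRange_one]
  simp only [Int.sub_zero, Int.zero_add, List.map_map, Function.comp_def]
  rw [map_range_ite_eq_replicate q r batches.toNat hr0 (by omega)]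
  -- B side
  rw [show total_rows = q * ((batches.toNat : Nat) : Int) + r from by rw [hnb]; exact hdecomp]
  rw [greedy_eq_blocks batches.toNat q r hr0 (by omega)]

-- ===== VERDICT (by name: the statement is the Claim_ definition above) =====
theorem get_batch_sizes_spec : Claim_equal_get_batch_sizes := by
  intro total_rows batches _ hpre
  exact get_batch_sizes_eq_alt total_rows batches hpre.1 hpre.2.1 hpre.2.2
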